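-- pv_equiv track=rewrite | github.com/josephtingiris/vscode-alternative-keybindings | bin/keybindings-lint-comments.py | find_top_level_objects
-- ===== SOURCE A (Python) =====
-- from typing import List, Tuple
--
-- def find_top_level_objects(lines: List[str]) -> List[List[Tuple[int, str]]]:
--     objs: List[List[Tuple[int, str]]] = []
--     buf: List[Tuple[int, str]] = []
--     depth = 0
--     in_array = False
--     for i, line in enumerate(lines):
--         if not in_array and '[' in line:
--             in_array = True
--         opens = line.count('{')
--         closes = line.count('}')
--         prev_depth = depth
--         depth += opens - closes
--         if in_array and prev_depth == 0 and depth > 0: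
--             buf = [(i + 1, line)]
--         elif in_array and depth > 0:
--             buf.append((i + 1, line))
--         elif in_array and prev_depth > 0 and depth == 0:
--             objs.append(buf)
--             buf = []
--     return objs
-- ===== SOURCE B (Python) =====
-- from typing import List, Tuple
--
-- def find_top_level_objects(lines: List[str]) -> List[List[Tuple[int, str]]]:
--     # Pass 1: cumulative brace depth after each line.
--     depths: List[int] = []
--     d = 0
--     for line in lines:
--         d += line.count('{') - line.count('}')
--         depths.append(d)
--     # First line that contains '[' (grouping only starts there).
--     start = next((i for i, line in enumerate(lines) if '[' in line), None)
--     if start is None: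
--         return []
--     objs: List[List[Tuple[int, str]]] = []
--     buf: List[Tuple[int, str]] = []
--     prev = depths[start - 1] if start > 0 else 0
--     i = start
--     # Pass 2: read object boundaries off the precomputed depth profile.
--     for line, cur in zip(lines[start:], depths[start:]):
--         if prev == 0 and cur > 0:
--             buf = [(i + 1, line)]
--         elif cur > 0:
--             buf.append((i + 1, line))
--         elif prev > 0 and cur == 0:
--             objs.append(buf)
--             buf = []
--         prev = cur
--         i += 1
--     return objs
-- ===== Notes on version B (the rewrite author's own statement) =====
-- stated objective: alternative
-- what changed: B replaces A's single-pass four-field state machine (objs/buf/depth/in_array latch) by a two-pass decomposition: pass 1 precomputes the cumulative brace-depth profile and the first '['-line index, pass 2 reads object boundaries off the precomputed prev/cur depth pairs of the suffix, with no depth accumulation or latch in the grouping loop.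
import Mathlib
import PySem

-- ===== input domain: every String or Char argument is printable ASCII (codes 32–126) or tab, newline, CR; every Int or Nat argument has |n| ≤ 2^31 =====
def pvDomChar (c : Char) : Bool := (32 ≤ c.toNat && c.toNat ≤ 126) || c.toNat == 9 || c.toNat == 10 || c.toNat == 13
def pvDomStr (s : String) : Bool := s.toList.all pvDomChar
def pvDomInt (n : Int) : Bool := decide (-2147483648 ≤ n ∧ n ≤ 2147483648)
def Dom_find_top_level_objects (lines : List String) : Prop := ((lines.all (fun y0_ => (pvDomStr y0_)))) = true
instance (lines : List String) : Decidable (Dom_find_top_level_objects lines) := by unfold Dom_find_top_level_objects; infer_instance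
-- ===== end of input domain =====

-- B replaces A's one-pass depth/latch state machine by precompute-depths-then-scan; alternative decomposition, same cost.

-- ===== PORT A =====
-- the for-loop of A, as structural recursion over the lines with A's exact state (objs, buf, depth, in_array)
def find_top_level_objects_go (rest : List String) (i : Nat)
    (objs : List (List (Int × String))) (buf : List (Int × String))
    (depth : Int) (in_array : Bool) : List (List (Int × String)) :=
  match rest with
  | [] => objs
  | line :: rs =>
    let in_array' : Bool := if !in_array && PySem.Str.isIn "[" line then true else in_array
    let opens : Int := (PySem.Str.count line "{" : Int)
    let closes : Int := (PySem.Str.count line "}" : Int)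
    let prev_depth := depth
    let depth' := depth + opens - closes
    if in_array' = true ∧ prev_depth = 0 ∧ 0 < depth' then
      find_top_level_objects_go rs (i+1) objs [((i : Int) + 1, line)] depth' in_array'
    else if in_array' = true ∧ 0 < depth' then
      find_top_level_objects_go rs (i+1) objs (buf ++ [((i : Int) + 1, line)]) depth' in_array'
    else if in_array' = true ∧ 0 < prev_depth ∧ depth' = 0 then
      find_top_level_objects_go rs (i+1) (objs ++ [buf]) [] depth' in_array'
    else
      find_top_level_objects_go rs (i+1) objs buf depth' in_array'

def find_top_level_objects (lines : List String) : List (List (Int × String)) :=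
  find_top_level_objects_go lines 0 [] [] 0 false

-- ===== PORT B =====
-- net brace contribution of one line
def alt_inc (line : String) : Int :=
  (PySem.Str.count line "{" : Int) - (PySem.Str.count line "}" : Int)

-- pass 1: cumulative depth after each line (Python's append loop)
def alt_depths (d : Int) : List String → List Int
  | [] => []
  | line :: rs => (d + alt_inc line) :: alt_depths (d + alt_inc line) rs

-- next((i for i, line in enumerate(lines) if '[' in line), None)
def alt_first_open : List String → Option Nat
  | [] => none
  | line :: rs => if PySem.Str.isIn "[" line then some 0 else (alt_first_open rs).map (· + 1)

-- pass 2: the zip loop over (lines[start:], depths[start:]) with counter i and carried prev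
def alt_go : List String → List Int → Nat → Int →
    List (List (Int × String)) → List (Int × String) → List (List (Int × String))
  | [], _, _, _, objs, _ => objs
  | _ :: _, [], _, _, objs, _ => objs
  | line :: ls, cur :: ds, i, prev, objs, buf =>
    if prev = 0 ∧ 0 < cur then alt_go ls ds (i+1) cur objs [((i : Int) + 1, line)]
    else if 0 < cur then alt_go ls ds (i+1) cur objs (buf ++ [((i : Int) + 1, line)])
    else if 0 < prev ∧ cur = 0 then alt_go ls ds (i+1) cur (objs ++ [buf]) []
    else alt_go ls ds (i+1) cur objs buf

def find_top_level_objects_alt (lines : List String) : List (List (Int × String)) :=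
  let depths := alt_depths 0 lines
  match alt_first_open lines with
  | none => []
  | some s =>
    let prev0 : Int := if 0 < s then PySem.List.pyGetD depths ((s : Int) - 1) 0 else 0
    -- lines[start:] / depths[start:] are the slices lines[s:], depths[s:]
    alt_go (PySem.List.slice lines (some (s : Int)) none)
           (PySem.List.slice depths (some (s : Int)) none) s prev0 [] []

-- ===== PRECONDITION & SPEC =====
def Spec_find_top_level_objects (lines : List String) (out : List (List (Int × String))) : Prop := out = find_top_level_objects_alt lines
instance (lines : List String) (out : List (List (Int × String))) : Decidable (Spec_find_top_level_objects lines out) := by unfold Spec_find_top_level_objects; infer_instance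

-- ===== CLAIM (what is proved, stated in full; the proofs are below) =====
def Claim_equal_find_top_level_objects : Prop := ∀ (lines : List String), Dom_find_top_level_objects lines → Spec_find_top_level_objects lines (find_top_level_objects lines)

-- ===== LEMMAS AND PROOFS =====

-- sum of the brace contributions of a list of lines
def alt_incSum (ls : List String) : Int := (ls.map alt_inc).sum

theorem go_eq_alt_go (ls : List String) :
    ∀ (i : Nat) (d : Int) (objs : List (List (Int × String))) (buf : List (Int × String)),
      find_top_level_objects_go ls i objs buf d true = alt_go ls (alt_depths d ls) i d objs buf := by
  induction ls with
  | nil => intro i d objs buf; rfl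
  | cons line rs ih =>
    intro i d objs buf
    simp only [find_top_level_objects_go, alt_depths, alt_go, Bool.not_true,
      Bool.false_and]
    have e : d + (PySem.Str.count line "{" : Int) - (PySem.Str.count line "}" : Int) = d + alt_inc line := by
      unfold alt_inc; ring
    rw [e]
    split_ifs <;> simp_all [ih] <;> omega

theorem alt_first_open_lt (ls : List String) :
    ∀ s, alt_first_open ls = some s → s < ls.length := by
  induction ls with
  | nil => intro s h; simp [alt_first_open] at h
  | cons line rs ih =>
    intro s h
    by_cases hb : PySem.Str.isIn "[" line = true
    · rw [alt_first_open, if_pos hb] at h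
      cases h; simp
    · rw [alt_first_open, if_neg hb] at h
      cases ht : alt_first_open rs with
      | none => rw [ht] at h; simp at h
      | some t =>
        rw [ht] at h
        simp only [Option.map_some, Option.some.injEq] at h
        have := ih t ht
        simp [← h]; omega

theorem go_pre (ls : List String) :
    ∀ (i : Nat) (d : Int),
      find_top_level_objects_go ls i [] [] d false =
        (match alt_first_open ls with
         | none => []
         | some s => alt_go (ls.drop s) ((alt_depths d ls).drop s) (i + s)
             (d + alt_incSum (ls.take s)) [] []) := by
  induction ls with
  | nil => intro i d; rfl
  | cons line rs ih =>
    intro i d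
    by_cases hb : PySem.Str.isIn "[" line = true
    · have hb' : PySem.Chars.isIn ['['] line.toList = true := by simpa using hb
      -- latch fires on this line: A's step this iteration already runs with in_array = true
      have hA : find_top_level_objects_go (line :: rs) i [] [] d false
          = find_top_level_objects_go (line :: rs) i [] [] d true := by
        simp [find_top_level_objects_go, hb']
      rw [hA, go_eq_alt_go]
      simp [alt_first_open, hb', alt_incSum]
    · have hb' : PySem.Chars.isIn ['['] line.toList = false := by
        simp only [Bool.not_eq_true] at hb; simpa using hb
      have hA : find_top_level_objects_go (line :: rs) i [] [] d false
          = find_top_level_objects_go rs (i+1) [] [] (d + alt_inc line) false := by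
        have e : d + (PySem.Chars.count line.toList ['{'] : Int) - (PySem.Chars.count line.toList ['}'] : Int)
            = d + alt_inc line := by unfold alt_inc; simp; ring
        simp [find_top_level_objects_go, hb', e]
      rw [hA, ih]
      cases h : alt_first_open rs with
      | none => simp [alt_first_open, hb', h]
      | some t =>
        simp only [alt_first_open, h, Option.map_some, if_neg hb,
          alt_depths, List.drop_succ_cons, List.take_succ_cons]
        have hi : i + (t + 1) = (i + 1) + t := by omega
        rw [hi]
        congr 1
        simp [alt_incSum]
        ring

theorem alt_depths_getD (ls : List String) :
    ∀ (d : Int) (j : Nat), j < ls.length →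
      PySem.List.pyGetD (alt_depths d ls) ((j : Int)) 0 = d + alt_incSum (ls.take (j+1)) := by
  induction ls with
  | nil => intro d j h; simp at h
  | cons line rs ih =>
    intro d j h
    rw [PySem.List.pyGetD_natCast]
    cases j with
    | zero => simp [alt_depths, alt_incSum]
    | succ t =>
      have h2 : t < rs.length := by simpa using h
      have := ih (d + alt_inc line) t h2
      rw [PySem.List.pyGetD_natCast] at this
      simp only [alt_depths, List.getD_cons_succ, List.take, alt_incSum, List.map, List.sum_cons] at this ⊢
      rw [this]; ring

-- ===== VERDICT (by name: the statement is the Claim_ definition above) =====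
theorem find_top_level_objects_spec : Claim_equal_find_top_level_objects := by
  unfold Claim_equal_find_top_level_objects Spec_find_top_level_objects
  intro lines _
  unfold find_top_level_objects find_top_level_objects_alt
  rw [go_pre]
  cases h : alt_first_open lines with
  | none => rfl
  | some s =>
    have hlt := alt_first_open_lt lines s h
    simp only [PySem.List.slice_from_natCast, Nat.zero_add]
    have hp : (if 0 < s then PySem.List.pyGetD (alt_depths 0 lines) ((s : Int) - 1) 0 else 0)
        = 0 + alt_incSum (lines.take s) := by
      by_cases hs : 0 < s
      · rw [if_pos hs]
        have hj : s - 1 < lines.length := by omega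
        have hg := alt_depths_getD lines 0 (s - 1) hj
        have hc : ((s : Int) - 1) = (((s - 1 : Nat)) : Int) := by omega
        rw [hc, hg]
        have hsucc : s - 1 + 1 = s := by omega
        rw [hsucc]
      · have h0 : s = 0 := by omega
        subst h0
        simp [alt_incSum]
    rw [hp]
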